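-- pv_equiv track=rewrite | github.com/The-Ray-Man/dobble | server/server.py | fanoplane
-- ===== SOURCE A (Python) =====
-- def generateVectors(size):
--     vectors = []
--     for i in range(1, size):
--         vectors.append((i,1))
--
--     return vectors
--
-- def fanoplane(size):
--
--     List = [[i+size*j for i in range(size)] for j in range(size)]
--     List2 = [size*size+i for i in range(size+1)]
--
--     vectors = generateVectors(size)
--     card_list = []
--     for l in List:
--         newList = l[:]
--         newList.append(List2[0])
--         card_list.append(newList)
--
--
--     for i in range(size):
--         newList = []
--         for j in range(size):
--             newList.append(List[j][i])
--         newList.append(List2[-1])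
--         card_list.append(newList)
--
--
--     for i in range(len(vectors)):
--         x,y = vectors[i]
--         x_pos = 0
--         y_pos = 0
--         for offset in range(size):
--             x_pos = offset
--             new_List = []
--             for step in range(size):
--                 new_List.append(List[(x_pos+step*x)%size][(y_pos+step*y)%size])
--             new_List.append(List2[i+1])
--             card_list.append(new_List)
--
--     card_list.append(List2)
--
--     return card_list
-- ===== SOURCE B (Python) =====
-- def fanoplane(size):
--     # Scatter construction: one pass over grid points, bucketing each point into
--     # every card (row, column, slope classes) it lies on, instead of generating
--     # each card's points; per-bucket append order reproduces A's card contents.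
--     n = size * size
--     rows = [[] for _ in range(size)]
--     cols = [[] for _ in range(size)]
--     slopes = [[[] for _ in range(size)] for _ in range(size - 1)]
--     for b in range(size):
--         for a in range(size):
--             p = b + size * a
--             rows[a].append(p)
--             cols[b].append(p)
--             for x in range(1, size):
--                 slopes[x - 1][(a - b * x) % size].append(p)
--     deck = [card + [n] for card in rows]
--     deck += [card + [n + size] for card in cols]
--     for x in range(1, size):
--         deck += [card + [n + x] for card in slopes[x - 1]]
--     deck.append(list(range(n, n + size + 1)))
--     return deck
-- ===== Notes on version B (the rewrite author's own statement) =====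
-- stated objective: alternative
-- what changed: Replaces A's per-card gather (stepping a direction vector through a grid table to collect each card's points) by a scatter/bucketing construction: a single pass over the grid points that appends each point to its row bucket, column bucket, and one bucket per slope class, then assembles the deck from the buckets.
import Mathlib
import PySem

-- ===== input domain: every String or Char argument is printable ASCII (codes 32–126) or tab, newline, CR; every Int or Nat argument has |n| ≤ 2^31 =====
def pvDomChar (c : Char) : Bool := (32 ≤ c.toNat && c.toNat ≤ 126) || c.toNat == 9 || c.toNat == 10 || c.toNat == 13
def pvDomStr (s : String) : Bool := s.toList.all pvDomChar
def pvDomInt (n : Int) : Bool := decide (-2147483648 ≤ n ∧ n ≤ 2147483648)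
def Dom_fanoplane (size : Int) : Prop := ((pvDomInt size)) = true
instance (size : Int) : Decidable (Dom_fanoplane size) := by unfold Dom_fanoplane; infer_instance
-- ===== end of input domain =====

-- B replaces A's per-card gather (stepping direction vectors through a grid) by a scatter pass that
-- buckets each grid point into all its cards (objective: alternative); same return value for every int size.



-- ===== PORT A =====
def generateVectors (size : Int) : List (Int × Int) :=
  (PySem.List.pyRange 1 size 1).map (fun i => (i, 1))

-- A's local `List` (the size×size grid) and `List2`, lifted as helpers
def pvGridA (size : Int) : List (List Int) :=
  (PySem.List.pyRange 0 size 1).map (fun j =>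
    (PySem.List.pyRange 0 size 1).map (fun i => i + size * j))

def pvList2A (size : Int) : List Int :=
  (PySem.List.pyRange 0 (size + 1) 1).map (fun i => size * size + i)

def fanoplane (size : Int) : List (List Int) :=
  -- first loop: each grid row plus List2[0]
  ((pvGridA size).map (fun l => l ++ [PySem.List.pyGetD (pvList2A size) 0 0]))
  ++
  -- second loop: columns plus List2[-1]
  ((PySem.List.pyRange 0 size 1).map (fun i =>
    ((PySem.List.pyRange 0 size 1).map (fun j =>
      PySem.List.pyGetD (PySem.List.pyGetD (pvGridA size) j []) i 0))
    ++ [PySem.List.pyGetD (pvList2A size) (-1) 0]))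
  ++
  -- third loop: for each vector, size offset-lines plus List2[i+1]
  ((PySem.List.pyRange 0 ((generateVectors size).length : Int) 1).flatMap (fun i =>
    let xy := PySem.List.pyGetD (generateVectors size) i (0, 0)
    (PySem.List.pyRange 0 size 1).map (fun offset =>
      ((PySem.List.pyRange 0 size 1).map (fun step =>
        PySem.List.pyGetD
          (PySem.List.pyGetD (pvGridA size)
            (PySem.Int.mod (offset + step * xy.1) size) [])
          (PySem.Int.mod (0 + step * xy.2) size) 0))
      ++ [PySem.List.pyGetD (pvList2A size) (i + 1) 0])))
  ++ [pvList2A size]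

-- ===== PORT B =====
-- Source B's `rows[i].append(p)` (in-place append at a list index) as get-modify-set; exact for the
-- in-range nonnegative indices Source B uses
def pvBump (xs : List (List Int)) (i : Int) (p : Int) : List (List Int) :=
  PySem.List.pySetD xs i ((PySem.List.pyGetD xs i []) ++ [p])

-- Source B's `slopes[i][t].append(p)`
def pvBump2 (ss : List (List (List Int))) (i t p : Int) : List (List (List Int)) :=
  PySem.List.pySetD ss i (pvBump (PySem.List.pyGetD ss i []) t p)

-- Source B's scatter pass: state (rows, cols, slopes) after the double loop over grid points
def pvScatterB (size : Int) : List (List Int) × List (List Int) × List (List (List Int)) :=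
  (PySem.List.pyRange 0 size 1).foldl (fun st b =>
      (PySem.List.pyRange 0 size 1).foldl (fun st a =>
        let p := b + size * a
        (pvBump st.1 a p,
         pvBump st.2.1 b p,
         (PySem.List.pyRange 1 size 1).foldl (fun sl x =>
            pvBump2 sl (x - 1) (PySem.Int.mod (a - b * x) size) p) st.2.2)) st)
    ((PySem.List.pyRange 0 size 1).map (fun _ => []),
     (PySem.List.pyRange 0 size 1).map (fun _ => []),
     (PySem.List.pyRange 0 (size - 1) 1).map (fun _ =>
       (PySem.List.pyRange 0 size 1).map (fun _ => [])))

def fanoplane_alt (size : Int) : List (List Int) :=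
  ((pvScatterB size).1.map (fun card => card ++ [size * size]))
  ++ ((pvScatterB size).2.1.map (fun card => card ++ [size * size + size]))
  ++ ((PySem.List.pyRange 1 size 1).flatMap (fun x =>
        (PySem.List.pyGetD (pvScatterB size).2.2 (x - 1) []).map
          (fun card => card ++ [size * size + x])))
  ++ [PySem.List.pyRange (size * size) (size * size + size + 1) 1]

-- ===== PRECONDITION & SPEC =====
def Spec_fanoplane (size : Int) (out : List (List Int)) : Prop := out = fanoplane_alt size
instance (size : Int) (out : List (List Int)) : Decidable (Spec_fanoplane size out) := by unfold Spec_fanoplane; infer_instance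

-- ===== CLAIM (what is proved, stated in full; the proofs are below) =====
def Claim_equal_fanoplane : Prop := ∀ (size : Int), Dom_fanoplane size → Spec_fanoplane size (fanoplane size)

-- ===== LEMMAS AND PROOFS =====
-- ---------- closed forms shared by both directions of the proof ----------

-- the parallel class of `size` cards with direction (da,db), intercept axis (ia,ib), label
def pvClassCards (size da db ia ib label : Int) : List (List Int) :=
  (PySem.List.pyRange 0 size 1).map (fun t =>
    ((PySem.List.pyRange 0 size 1).map (fun s =>
      PySem.Int.mod (ia * t + s * da) size * size + PySem.Int.mod (ib * t + s * db) size))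
    ++ [size * size + label])

-- scatter-state closed forms after k outer iterations
def pvRowsAt (size : Int) (k : Nat) : List (List Int) :=
  (List.range size.toNat).map (fun (a : Nat) =>
    (List.range k).map (fun (b : Nat) => (b : Int) + size * (a : Int)))

def pvColFull (size : Int) (b : Nat) : List Int :=
  (List.range size.toNat).map (fun (a : Nat) => (b : Int) + size * (a : Int))

def pvColsAt (size : Int) (k : Nat) : List (List Int) :=
  (List.range size.toNat).map (fun b => if b < k then pvColFull size b else [])

def pvSlopesAt (size : Int) (k : Nat) : List (List (List Int)) :=
  (List.range (size.toNat - 1)).map (fun (xm1 : Nat) =>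
    (List.range size.toNat).map (fun (t : Nat) =>
      (List.range k).map (fun (b : Nat) =>
        (b : Int) + size * PySem.Int.mod ((t : Int) + (b : Int) * ((xm1 : Int) + 1)) size)))

-- ---------- generic fold lemmas ----------

lemma pv_foldl_len {α β : Type} (l : List α) (step : List β → α → List β)
    (h : ∀ s a, (step s a).length = s.length) (s0 : List β) :
    (l.foldl step s0).length = s0.length := by
  induction l generalizing s0 with
  | nil => rfl
  | cons a l ih => simp [List.foldl_cons, ih, h]

lemma pv_foldl_prod3 {α A B C : Type} (l : List α) (f : A → α → A) (g : B → α → B)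
    (h : C → α → C) (r : A) (c : B) (s : C) :
    (l.foldl (fun st a => (f st.1 a, g st.2.1 a, h st.2.2 a)) (r, c, s)) =
      (l.foldl f r, l.foldl g c, l.foldl h s) := by
  induction l generalizing r c s with
  | nil => rfl
  | cons a l ih => simp [List.foldl_cons, ih]

lemma pv_foldl_proj {σ τ' α : Type} (l : List α) (step : σ → α → σ) (g : τ' → α → τ')
    (π : σ → τ') (P : σ → Prop) (hP : ∀ s a, P s → P (step s a))
    (hπ : ∀ s a, P s → π (step s a) = g (π s) a) (s0 : σ) (hs0 : P s0) :
    π (l.foldl step s0) = l.foldl g (π s0) := by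
  induction l generalizing s0 with
  | nil => rfl
  | cons a l ih =>
    simp only [List.foldl_cons]
    rw [ih (step s0 a) (hP s0 a hs0), hπ s0 a hs0]

lemma pv_bumpfold_getElem? {α : Type} (l : List α) (τ v : α → Int) (r0 : List (List Int))
    (hτ : ∀ a ∈ l, 0 ≤ τ a ∧ τ a < (r0.length : Int)) (i : Nat) :
    (l.foldl (fun r a => pvBump r (τ a) (v a)) r0)[i]? =
      r0[i]?.map (fun cur => cur ++ (l.filter (fun a => τ a == (i : Int))).map v) := by
  induction l generalizing r0 with
  | nil => cases h : r0[i]? <;> simp [h]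
  | cons a l ih =>
    obtain ⟨hb0, hb1⟩ := hτ a (List.mem_cons_self)
    have hlen : (τ a).toNat < r0.length := by omega
    have hstep : pvBump r0 (τ a) (v a) = r0.set (τ a).toNat (r0[(τ a).toNat] ++ [v a]) := by
      rw [pvBump, PySem.List.pySetD_of_nonneg _ _ hb0,
        PySem.List.pyGetD_eq_getElem _ _ hb0 (by simpa using hb1)]
    rw [List.foldl_cons, hstep,
      ih _ (fun a' ha' => by simpa [List.length_set] using hτ a' (List.mem_cons_of_mem _ ha'))]
    by_cases hcase : τ a = (i : Int)
    · have hia : (τ a).toNat = i := by omega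
      have hi : i < r0.length := by omega
      simp [hi, hcase]
    · have hia : (τ a).toNat ≠ i := by omega
      simp [hia, hcase]

lemma pv_modfold_getElem? {α β : Type} (l : List α) (τ : α → Int) (F : α → β → β) (d : β)
    (r0 : List β) (hτ : ∀ a ∈ l, 0 ≤ τ a ∧ τ a < (r0.length : Int))
    (hnd : l.Pairwise (fun a b => τ a ≠ τ b)) (i : Nat) :
    (l.foldl (fun r a => PySem.List.pySetD r (τ a) (F a (PySem.List.pyGetD r (τ a) d))) r0)[i]? =
      match l.find? (fun a => τ a == (i : Int)) with
      | some a => r0[i]?.map (F a)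
      | none => r0[i]? := by
  induction l generalizing r0 with
  | nil => simp
  | cons a l ih =>
    obtain ⟨hb0, hb1⟩ := hτ a List.mem_cons_self
    have hlen : (τ a).toNat < r0.length := by omega
    have hstep : PySem.List.pySetD r0 (τ a) (F a (PySem.List.pyGetD r0 (τ a) d)) =
        r0.set (τ a).toNat (F a r0[(τ a).toNat]) := by
      rw [PySem.List.pySetD_of_nonneg _ _ hb0,
        PySem.List.pyGetD_eq_getElem _ _ hb0 (by simpa using hb1)]
    rw [List.foldl_cons, hstep,
      ih _ (fun a' ha' => by simpa [List.length_set] using hτ a' (List.mem_cons_of_mem _ ha'))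
        (List.Pairwise.of_cons hnd)]
    by_cases hcase : τ a = (i : Int)
    · have hia : (τ a).toNat = i := by omega
      have hi : i < r0.length := by omega
      have hnone : l.find? (fun b => τ b == (i : Int)) = none := by
        rw [List.find?_eq_none]
        intro b hb
        have hne := (List.pairwise_cons.mp hnd).1 b hb
        simp only [beq_iff_eq]
        omega
      simp [hcase, hnone, hi]
    · have hia : (τ a).toNat ≠ i := by omega
      have hfa : (τ a == (i : Int)) = false := by simpa using hcase
      rw [List.find?_cons_of_neg (by simp [hcase])]
      cases l.find? (fun b => τ b == (i : Int)) <;>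
        simp [hia]

-- ---------- small arithmetic / range facts ----------

lemma pv_mod_id (a b : Int) (h0 : 0 ≤ a) (h1 : a < b) : PySem.Int.mod a b = a := by
  rw [PySem.Int.mod_eq_emod_of_pos (by omega)]
  exact Int.emod_eq_of_lt h0 h1

lemma pv_mod_shift (size a t c : Int) (hs : 0 < size) (ha0 : 0 ≤ a) (ha1 : a < size)
    (ht0 : 0 ≤ t) (ht1 : t < size) :
    PySem.Int.mod (a - c) size = t ↔ a = PySem.Int.mod (t + c) size := by
  rw [PySem.Int.mod_eq_emod_of_pos hs, PySem.Int.mod_eq_emod_of_pos hs]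
  constructor
  · intro h
    have : (t + c) % size = (a - c + c) % size := by
      rw [← h, Int.emod_add_emod]
    rw [this]
    simp only [sub_add_cancel]
    exact (Int.emod_eq_of_lt ha0 ha1).symm
  · intro h
    have : (a - c) % size = (t + c - c) % size := by
      rw [h, Int.emod_sub_emod]
    rw [this]
    simp only [add_sub_cancel_right]
    exact Int.emod_eq_of_lt ht0 ht1

lemma pv_filter_pyRange (size j : Int) (h0 : 0 ≤ j) (h1 : j < size) :
    (PySem.List.pyRange 0 size 1).filter (fun a => a == j) = [j] := by
  rw [PySem.List.pyRange_one_append 0 j size h0 (by omega), List.filter_append,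
    PySem.List.pyRange_one_cons h1, List.filter_cons]
  have h1' : (PySem.List.pyRange 0 j 1).filter (fun a => a == j) = [] := by
    rw [List.filter_eq_nil_iff]
    intro b hb
    rw [PySem.List.mem_pyRange_one] at hb
    simp only [beq_iff_eq]
    omega
  have h2' : (PySem.List.pyRange (j + 1) size 1).filter (fun a => a == j) = [] := by
    rw [List.filter_eq_nil_iff]
    intro b hb
    rw [PySem.List.mem_pyRange_one] at hb
    simp only [beq_iff_eq]
    omega
  simp [h1', h2']

lemma pv_find?_pyRange (size : Int) (j : Int) (h0 : 0 ≤ j) (h1 : j + 1 < size) :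
    (PySem.List.pyRange 1 size 1).find? (fun x => x - 1 == j) = some (j + 1) := by
  rw [PySem.List.pyRange_one_append 1 (j + 1) size (by omega) (by omega), List.find?_append]
  have h1' : (PySem.List.pyRange 1 (j + 1) 1).find? (fun x => x - 1 == j) = none := by
    rw [List.find?_eq_none]
    intro b hb
    rw [PySem.List.mem_pyRange_one] at hb
    simp only [beq_iff_eq]
    omega
  rw [h1', PySem.List.pyRange_one_cons (by omega), List.find?_cons_of_pos (by simp)]
  rfl

-- ---------- the scatter invariant ----------

lemma pv_rows_step (size : Int) (hs : 0 < size) (k : Nat) :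
    (PySem.List.pyRange 0 size 1).foldl
      (fun r a => pvBump r a ((k : Int) + size * a)) (pvRowsAt size k) =
      pvRowsAt size (k + 1) := by
  have hN : ((size.toNat : Int)) = size := by omega
  have hlenr : (pvRowsAt size k).length = size.toNat := by simp [pvRowsAt]
  have hτ : ∀ a ∈ PySem.List.pyRange 0 size 1,
      0 ≤ a ∧ a < ((pvRowsAt size k).length : Int) := by
    intro a ha
    rw [PySem.List.mem_pyRange_one] at ha
    omega
  apply List.ext_getElem?
  intro i
  rw [pv_bumpfold_getElem? (PySem.List.pyRange 0 size 1) (fun a => a)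
    (fun a => (k : Int) + size * a) (pvRowsAt size k) hτ i]
  by_cases hi : i < size.toNat
  · have hfil := pv_filter_pyRange size (i : Int) (by omega) (by omega)
    have e1 : (pvRowsAt size k)[i]? =
        some ((List.range k).map (fun (b : Nat) => (b : Int) + size * (i : Int))) := by
      simp only [pvRowsAt, List.getElem?_map, List.getElem?_range hi, Option.map_some]
    have e2 : (pvRowsAt size (k + 1))[i]? =
        some ((List.range (k + 1)).map (fun (b : Nat) => (b : Int) + size * (i : Int))) := by
      simp only [pvRowsAt, List.getElem?_map, List.getElem?_range hi, Option.map_some]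
    rw [e1, e2, List.range_succ, List.map_append, hfil]
    simp only [Option.map_some, List.map_cons, List.map_nil]
  · have h1 : (pvRowsAt size k)[i]? = none := by
      rw [List.getElem?_eq_none]; simp [pvRowsAt]; omega
    have h2 : (pvRowsAt size (k + 1))[i]? = none := by
      rw [List.getElem?_eq_none]; simp [pvRowsAt]; omega
    simp [h1, h2]

lemma pv_cols_step (size : Int) (hs : 0 < size) (k : Nat) (hk : k < size.toNat) :
    (PySem.List.pyRange 0 size 1).foldl
      (fun c a => pvBump c (k : Int) ((k : Int) + size * a)) (pvColsAt size k) =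
      pvColsAt size (k + 1) := by
  have hN : ((size.toNat : Int)) = size := by omega
  have hτ : ∀ a ∈ PySem.List.pyRange 0 size 1,
      0 ≤ (k : Int) ∧ (k : Int) < ((pvColsAt size k).length : Int) := by
    intro a _
    simp only [pvColsAt, List.length_map, List.length_range]
    omega
  apply List.ext_getElem?
  intro i
  rw [pv_bumpfold_getElem? (PySem.List.pyRange 0 size 1) (fun _ => (k : Int))
    (fun a => (k : Int) + size * a) (pvColsAt size k) hτ i]
  by_cases hi : i < size.toNat
  · have e1 : (pvColsAt size k)[i]? =
        some (if i < k then pvColFull size i else []) := by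
      simp only [pvColsAt, List.getElem?_map, List.getElem?_range hi, Option.map_some]
    have e2 : (pvColsAt size (k + 1))[i]? =
        some (if i < k + 1 then pvColFull size i else []) := by
      simp only [pvColsAt, List.getElem?_map, List.getElem?_range hi, Option.map_some]
    rw [e1, e2, Option.map_some]
    by_cases hik : i = k
    · subst hik
      have hfil : (PySem.List.pyRange 0 size 1).filter (fun a => (i : Int) == (i : Int)) =
          PySem.List.pyRange 0 size 1 := List.filter_eq_self.mpr (fun a _ => by simp)
      rw [hfil, if_neg (lt_irrefl i), if_pos (Nat.lt_succ_self i), List.nil_append, pvColFull,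
        PySem.List.pyRange_one 0 size, List.map_map, sub_zero]
      congr 1
      apply List.map_congr_left
      intro b _
      simp only [Function.comp_apply]
      ring
    · have hfil : (PySem.List.pyRange 0 size 1).filter (fun a => (k : Int) == (i : Int)) = [] := by
        rw [List.filter_eq_nil_iff]
        intro b _
        simp only [beq_iff_eq]
        omega
      rw [hfil]
      have : (i < k + 1) = (i < k) := by
        apply propext
        omega
      simp [this]
  · have h1 : (pvColsAt size k)[i]? = none := by
      rw [List.getElem?_eq_none]; simp [pvColsAt]; omega
    have h2 : (pvColsAt size (k + 1))[i]? = none := by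
      rw [List.getElem?_eq_none]; simp [pvColsAt]; omega
    simp [h1, h2]

-- one slope class's bucket list after one more sweep of the grid row b = k
lemma pv_bucket_step (size : Int) (hs : 0 < size) (k : Nat) (x : Int) :
    (PySem.List.pyRange 0 size 1).foldl
      (fun bl a => pvBump bl (PySem.Int.mod (a - (k : Int) * x) size) ((k : Int) + size * a))
      ((List.range size.toNat).map (fun (t : Nat) =>
        (List.range k).map (fun (b : Nat) =>
          (b : Int) + size * PySem.Int.mod ((t : Int) + (b : Int) * x) size))) =
    (List.range size.toNat).map (fun (t : Nat) =>
      (List.range (k + 1)).map (fun (b : Nat) =>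
        (b : Int) + size * PySem.Int.mod ((t : Int) + (b : Int) * x) size)) := by
  have hN : ((size.toNat : Int)) = size := by omega
  have hlen : ((List.range size.toNat).map (fun (t : Nat) =>
      (List.range k).map (fun (b : Nat) =>
        (b : Int) + size * PySem.Int.mod ((t : Int) + (b : Int) * x) size))).length = size.toNat := by
    simp
  have hτ : ∀ a ∈ PySem.List.pyRange 0 size 1,
      0 ≤ PySem.Int.mod (a - (k : Int) * x) size ∧
      PySem.Int.mod (a - (k : Int) * x) size < (((List.range size.toNat).map (fun (t : Nat) =>
        (List.range k).map (fun (b : Nat) =>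
          (b : Int) + size * PySem.Int.mod ((t : Int) + (b : Int) * x) size))).length : Int) := by
    intro a _
    rw [hlen, hN]
    exact ⟨PySem.Int.mod_nonneg _ hs, PySem.Int.mod_lt _ hs⟩
  apply List.ext_getElem?
  intro t
  rw [pv_bumpfold_getElem? (PySem.List.pyRange 0 size 1)
    (fun a => PySem.Int.mod (a - (k : Int) * x) size)
    (fun a => (k : Int) + size * a) _ hτ t]
  by_cases ht : t < size.toNat
  · have hfil : (PySem.List.pyRange 0 size 1).filter
        (fun a => PySem.Int.mod (a - (k : Int) * x) size == (t : Int)) =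
        [PySem.Int.mod ((t : Int) + (k : Int) * x) size] := by
      rw [List.filter_congr (q := fun a => a == PySem.Int.mod ((t : Int) + (k : Int) * x) size)
        (fun a ha => ?_), pv_filter_pyRange size _ (PySem.Int.mod_nonneg _ hs) (PySem.Int.mod_lt _ hs)]
      rw [PySem.List.mem_pyRange_one] at ha
      have := pv_mod_shift size a (t : Int) ((k : Int) * x) hs ha.1 ha.2 (by omega) (by omega)
      by_cases hc : PySem.Int.mod (a - (k : Int) * x) size = (t : Int)
      · have hb1 : (PySem.Int.mod (a - (k : Int) * x) size == (t : Int)) = true := by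
          simp [hc]
        have hb2 : (a == PySem.Int.mod ((t : Int) + (k : Int) * x) size) = true := by
          simp [this.mp hc]
        rw [hb1]
        exact hb2.symm
      · have hna : ¬ a = PySem.Int.mod ((t : Int) + (k : Int) * x) size :=
          fun h => hc (this.mpr h)
        have hb1 : (PySem.Int.mod (a - (k : Int) * x) size == (t : Int)) = false := by
          simp [hc]
        have hb2 : (a == PySem.Int.mod ((t : Int) + (k : Int) * x) size) = false := by
          simp [hna]
        rw [hb1]
        exact hb2.symm
    rw [hfil]
    simp only [List.getElem?_map, List.getElem?_range ht, Option.map_some, List.map_cons,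
      List.map_nil, List.range_succ, List.map_append]
  · have hnone : ∀ (m : Nat), ((List.range size.toNat).map (fun (t : Nat) =>
        (List.range m).map (fun (b : Nat) =>
          (b : Int) + size * PySem.Int.mod ((t : Int) + (b : Int) * x) size)))[t]? = none := by
      intro m
      rw [List.getElem?_eq_none]
      simp only [List.length_map, List.length_range]
      omega
    simp [hnone]

lemma pv_slopes_step (size : Int) (hs : 0 < size) (k : Nat) :
    (PySem.List.pyRange 0 size 1).foldl
      (fun s a =>
        (PySem.List.pyRange 1 size 1).foldl (fun sl x =>
          pvBump2 sl (x - 1) (PySem.Int.mod (a - (k : Int) * x) size) ((k : Int) + size * a)) s)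
      (pvSlopesAt size k) =
      pvSlopesAt size (k + 1) := by
  have hN : ((size.toNat : Int)) = size := by omega
  have hM : (((size.toNat - 1 : Nat) : Int)) = size - 1 := by omega
  have hstep_len : ∀ (s : List (List (List Int))) (a : Int),
      ((PySem.List.pyRange 1 size 1).foldl (fun sl x =>
        pvBump2 sl (x - 1) (PySem.Int.mod (a - (k : Int) * x) size) ((k : Int) + size * a)) s).length
        = s.length := by
    intro s a
    apply pv_foldl_len
    intro s' x
    rw [pvBump2, PySem.List.length_pySetD]
  have hlen0 : (pvSlopesAt size k).length = size.toNat - 1 := by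
    simp [pvSlopesAt]
  have hlenF : ((PySem.List.pyRange 0 size 1).foldl
      (fun s a =>
        (PySem.List.pyRange 1 size 1).foldl (fun sl x =>
          pvBump2 sl (x - 1) (PySem.Int.mod (a - (k : Int) * x) size) ((k : Int) + size * a)) s)
      (pvSlopesAt size k)).length = size.toNat - 1 := by
    rw [pv_foldl_len _ _ (fun s a => hstep_len s a), hlen0]
  apply List.ext_getElem?
  intro xm1
  by_cases hx : xm1 < size.toNat - 1
  · have hgetD : ((PySem.List.pyRange 0 size 1).foldl
        (fun s a =>
          (PySem.List.pyRange 1 size 1).foldl (fun sl x =>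
            pvBump2 sl (x - 1) (PySem.Int.mod (a - (k : Int) * x) size) ((k : Int) + size * a)) s)
        (pvSlopesAt size k)).getD xm1 [] =
        (PySem.List.pyRange 0 size 1).foldl
          (fun bl a => pvBump bl (PySem.Int.mod (a - (k : Int) * ((xm1 : Int) + 1)) size)
            ((k : Int) + size * a))
          ((pvSlopesAt size k).getD xm1 []) := by
      refine pv_foldl_proj (PySem.List.pyRange 0 size 1)
        (fun s a =>
          (PySem.List.pyRange 1 size 1).foldl (fun sl x =>
            pvBump2 sl (x - 1) (PySem.Int.mod (a - (k : Int) * x) size) ((k : Int) + size * a)) s)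
        (fun bl a => pvBump bl (PySem.Int.mod (a - (k : Int) * ((xm1 : Int) + 1)) size)
          ((k : Int) + size * a))
        (fun s => s.getD xm1 [])
        (fun (s : List (List (List Int))) => s.length = size.toNat - 1)
        (fun s a hPs => (hstep_len s a).trans hPs) ?_ _ hlen0
      intro s a hPs
      beta_reduce
      have hτ' : ∀ x ∈ PySem.List.pyRange 1 size 1,
          0 ≤ x - 1 ∧ x - 1 < ((s.length : Int)) := by
        intro x hxm
        rw [PySem.List.mem_pyRange_one] at hxm
        rw [hPs]
        omega
      have hpair : (PySem.List.pyRange 1 size 1).Pairwise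
          (fun x y => x - 1 ≠ y - 1) :=
        (PySem.List.pairwise_lt_pyRange_one 1 size).imp (by intro a b h; omega)
      have hmf := pv_modfold_getElem? (PySem.List.pyRange 1 size 1) (fun x => x - 1)
        (fun x bl => pvBump bl (PySem.Int.mod (a - (k : Int) * x) size) ((k : Int) + size * a))
        [] s hτ' hpair xm1
      rw [pv_find?_pyRange size (xm1 : Int) (by omega) (by omega)] at hmf
      have hxl : xm1 < s.length := by omega
      rw [List.getD_eq_getElem?_getD, List.getD_eq_getElem?_getD]
      rw [show (fun sl x => pvBump2 sl (x - 1) (PySem.Int.mod (a - (k : Int) * x) size)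
          ((k : Int) + size * a)) = (fun sl x => PySem.List.pySetD sl (x - 1)
          ((fun x bl => pvBump bl (PySem.Int.mod (a - (k : Int) * x) size)
            ((k : Int) + size * a)) x (PySem.List.pyGetD sl (x - 1) []))) from rfl]
      rw [hmf, List.getElem?_eq_getElem hxl]
      simp
    have hget0 : (pvSlopesAt size k).getD xm1 [] =
        (List.range size.toNat).map (fun (t : Nat) =>
          (List.range k).map (fun (b : Nat) =>
            (b : Int) + size * PySem.Int.mod ((t : Int) + (b : Int) * ((xm1 : Int) + 1)) size)) := by
      rw [List.getD_eq_getElem?_getD, pvSlopesAt, List.getElem?_map, List.getElem?_range hx]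
      rfl
    have hget1 : (pvSlopesAt size (k + 1))[xm1]? =
        some ((List.range size.toNat).map (fun (t : Nat) =>
          (List.range (k + 1)).map (fun (b : Nat) =>
            (b : Int) + size * PySem.Int.mod ((t : Int) + (b : Int) * ((xm1 : Int) + 1)) size))) := by
      rw [pvSlopesAt, List.getElem?_map, List.getElem?_range hx]
      rfl
    have hxf : xm1 < ((PySem.List.pyRange 0 size 1).foldl
        (fun s a =>
          (PySem.List.pyRange 1 size 1).foldl (fun sl x =>
            pvBump2 sl (x - 1) (PySem.Int.mod (a - (k : Int) * x) size) ((k : Int) + size * a)) s)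
        (pvSlopesAt size k)).length := by omega
    rw [List.getElem?_eq_getElem hxf, hget1]
    congr 1
    have := hgetD
    rw [hget0, pv_bucket_step size hs k ((xm1 : Int) + 1)] at this
    rw [← this, List.getD_eq_getElem?_getD, List.getElem?_eq_getElem hxf]
    rfl
  · have h1 : ((PySem.List.pyRange 0 size 1).foldl
        (fun s a =>
          (PySem.List.pyRange 1 size 1).foldl (fun sl x =>
            pvBump2 sl (x - 1) (PySem.Int.mod (a - (k : Int) * x) size) ((k : Int) + size * a)) s)
        (pvSlopesAt size k))[xm1]? = none := by
      rw [List.getElem?_eq_none]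
      omega
    have h2 : (pvSlopesAt size (k + 1))[xm1]? = none := by
      rw [List.getElem?_eq_none]
      simp only [pvSlopesAt, List.length_map, List.length_range]
      omega
    rw [h1, h2]

lemma pv_scatter_inv (size : Int) (hs : 0 < size) (k : Nat) (hk : k ≤ size.toNat) :
    (PySem.List.pyRange 0 (k : Int) 1).foldl
      (fun st b =>
        (PySem.List.pyRange 0 size 1).foldl (fun st a =>
          let p := b + size * a
          (pvBump st.1 a p,
           pvBump st.2.1 b p,
           (PySem.List.pyRange 1 size 1).foldl (fun sl x =>
              pvBump2 sl (x - 1) (PySem.Int.mod (a - b * x) size) p) st.2.2)) st)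
      (pvRowsAt size 0, pvColsAt size 0, pvSlopesAt size 0) =
      (pvRowsAt size k, pvColsAt size k, pvSlopesAt size k) := by
  induction k with
  | zero =>
    rw [show (((0 : Nat)) : Int) = 0 from rfl, PySem.List.pyRange_one_eq_nil (le_refl 0)]
    rfl
  | succ k ih =>
    have hcast : (((k + 1 : Nat)) : Int) = (k : Int) + 1 := by push_cast; ring
    rw [hcast, PySem.List.pyRange_one_succ_right (by omega), List.foldl_append,
      ih (by omega), List.foldl_cons, List.foldl_nil]
    show (PySem.List.pyRange 0 size 1).foldl (fun st a =>
        (pvBump st.1 a ((k : Int) + size * a),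
         pvBump st.2.1 (k : Int) ((k : Int) + size * a),
         (PySem.List.pyRange 1 size 1).foldl (fun sl x =>
            pvBump2 sl (x - 1) (PySem.Int.mod (a - (k : Int) * x) size) ((k : Int) + size * a)) st.2.2))
      (pvRowsAt size k, pvColsAt size k, pvSlopesAt size k) = _
    rw [pv_foldl_prod3 (PySem.List.pyRange 0 size 1)
        (fun r a => pvBump r a ((k : Int) + size * a))
        (fun c a => pvBump c (k : Int) ((k : Int) + size * a))
        (fun s2 a => (PySem.List.pyRange 1 size 1).foldl (fun sl x =>
          pvBump2 sl (x - 1) (PySem.Int.mod (a - (k : Int) * x) size) ((k : Int) + size * a)) s2)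
        (pvRowsAt size k) (pvColsAt size k) (pvSlopesAt size k),
      pv_rows_step size hs k, pv_cols_step size hs k (by omega), pv_slopes_step size hs k]

-- ---------- A's segments in class form ----------

lemma pv_grid_get (size j : Int) (h0 : 0 ≤ j) (h1 : j < size) :
    PySem.List.pyGetD (pvGridA size) j [] =
      (PySem.List.pyRange 0 size 1).map (fun i => i + size * j) := by
  unfold pvGridA
  exact PySem.List.pyGetD_map_pyRange_of_nonneg _ _ _ _ h0 h1

lemma pv_list2_get (size i : Int) (h0 : 0 ≤ i) (h1 : i < size + 1) :
    PySem.List.pyGetD (pvList2A size) i 0 = size * size + i := by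
  unfold pvList2A
  exact PySem.List.pyGetD_map_pyRange_of_nonneg _ _ _ _ h0 h1

lemma pv_list2_last (size : Int) (h : 0 < size) :
    PySem.List.pyGetD (pvList2A size) (-1) 0 = size * size + size := by
  unfold pvList2A
  rw [PySem.List.pyRange_one_succ_right (by omega), List.map_append]
  exact PySem.List.pyGetD_neg_one_append_singleton _ _ _

-- segment 1: A's first loop = the horizontal class
lemma pv_seg1 (size : Int) (h : 0 < size) :
    (pvGridA size).map (fun l => l ++ [PySem.List.pyGetD (pvList2A size) 0 0]) =
      pvClassCards size 0 1 1 0 0 := by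
  unfold pvGridA pvClassCards
  rw [List.map_map]
  refine List.map_congr_left (fun t ht => ?_)
  rw [PySem.List.mem_pyRange_one] at ht
  rw [pv_list2_get size 0 (by omega) (by omega)]
  simp only [Function.comp, add_zero]
  congr 1
  refine List.map_congr_left (fun s hs => ?_)
  rw [PySem.List.mem_pyRange_one] at hs
  rw [show (1 : Int) * t + s * 0 = t by ring, show (0 : Int) * t + s * 1 = s by ring,
    pv_mod_id t size ht.1 ht.2, pv_mod_id s size hs.1 hs.2]
  ring

-- segment 2: A's second loop = the vertical class
lemma pv_seg2 (size : Int) (h : 0 < size) :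
    (PySem.List.pyRange 0 size 1).map (fun i =>
      ((PySem.List.pyRange 0 size 1).map (fun j =>
        PySem.List.pyGetD (PySem.List.pyGetD (pvGridA size) j []) i 0))
      ++ [PySem.List.pyGetD (pvList2A size) (-1) 0]) =
      pvClassCards size 1 0 0 1 size := by
  unfold pvClassCards
  refine List.map_congr_left (fun t ht => ?_)
  rw [PySem.List.mem_pyRange_one] at ht
  rw [pv_list2_last size h]
  congr 1
  refine List.map_congr_left (fun s hs => ?_)
  rw [PySem.List.mem_pyRange_one] at hs
  rw [pv_grid_get size s hs.1 hs.2,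
    PySem.List.pyGetD_map_pyRange_of_nonneg _ _ _ _ ht.1 ht.2,
    show (0 : Int) * t + s * 1 = s by ring, show (1 : Int) * t + s * 0 = t by ring,
    pv_mod_id s size hs.1 hs.2, pv_mod_id t size ht.1 ht.2]
  ring

-- the inner offset-block of A's third loop, for vector (x, 1), is slope class x
lemma pv_slope_block (size x : Int) (h : 0 < size) :
    (PySem.List.pyRange 0 size 1).map (fun offset =>
      ((PySem.List.pyRange 0 size 1).map (fun step =>
        PySem.List.pyGetD
          (PySem.List.pyGetD (pvGridA size)
            (PySem.Int.mod (offset + step * x) size) [])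
          (PySem.Int.mod (0 + step * 1) size) 0))
      ++ [size * size + x]) =
      pvClassCards size x 1 1 0 x := by
  unfold pvClassCards
  refine List.map_congr_left (fun t ht => ?_)
  rw [PySem.List.mem_pyRange_one] at ht
  congr 1
  refine List.map_congr_left (fun s hs => ?_)
  rw [PySem.List.mem_pyRange_one] at hs
  have hm0 : 0 ≤ PySem.Int.mod (t + s * x) size := PySem.Int.mod_nonneg _ h
  have hm1 : PySem.Int.mod (t + s * x) size < size := PySem.Int.mod_lt _ h
  rw [pv_grid_get size _ hm0 hm1, show (0 : Int) + s * 1 = s by ring,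
    pv_mod_id s size hs.1 hs.2,
    PySem.List.pyGetD_map_pyRange_of_nonneg _ _ _ _ hs.1 hs.2,
    show (1 : Int) * t + s * x = t + s * x by ring,
    show (0 : Int) * t + s * 1 = s by ring,
    pv_mod_id s size hs.1 hs.2]
  ring

-- segment 3: A's vector loop = the slope classes
lemma pv_seg3 (size : Int) (h : 0 < size) :
    ((PySem.List.pyRange 0 ((generateVectors size).length : Int) 1).flatMap (fun i =>
      let xy := PySem.List.pyGetD (generateVectors size) i (0, 0)
      (PySem.List.pyRange 0 size 1).map (fun offset =>
        ((PySem.List.pyRange 0 size 1).map (fun step =>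
          PySem.List.pyGetD
            (PySem.List.pyGetD (pvGridA size)
              (PySem.Int.mod (offset + step * xy.1) size) [])
            (PySem.Int.mod (0 + step * xy.2) size) 0))
        ++ [PySem.List.pyGetD (pvList2A size) (i + 1) 0]))) =
      (PySem.List.pyRange 1 size 1).flatMap (fun x => pvClassCards size x 1 1 0 x) := by
  have hlen : ((generateVectors size).length : Int) = size - 1 := by
    unfold generateVectors
    simp [PySem.List.length_pyRange_one]
    omega
  rw [hlen, PySem.List.pyRange_one 0 (size - 1), PySem.List.pyRange_one 1 size]
  have hN : (size - 1 - 0).toNat = (size - 1).toNat := by omega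
  rw [hN, List.flatMap_map, List.flatMap_map]
  refine List.flatMap_congr (fun k hk => ?_)
  rw [List.mem_range] at hk
  have hkI : (k : Int) < size - 1 := by omega
  have hget : PySem.List.pyGetD (generateVectors size) (0 + (k : Int)) (0, 0) = (1 + (k : Int), 1) := by
    rw [PySem.List.pyGetD_eq_getElem (generateVectors size) (0, 0) (by omega)
      (by unfold generateVectors; simp [PySem.List.length_pyRange_one]; omega)]
    unfold generateVectors
    have htn : ((0 : Int) + (k : Int)).toNat = k := by omega
    simp only [htn]
    simp [PySem.List.pyRange_one 1 size]
  simp only [hget]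
  have hlab : PySem.List.pyGetD (pvList2A size) ((0 : Int) + (k : Int) + 1) 0
      = size * size + (1 + (k : Int)) := by
    rw [pv_list2_get size _ (by omega) (by omega)]; ring_nf
  simp only [hlab]
  exact pv_slope_block size (1 + (k : Int)) h

-- ---------- B's sections in class form ----------

lemma pv_list2_eq (size : Int) :
    pvList2A size = PySem.List.pyRange (size * size) (size * size + size + 1) 1 := by
  rw [pvList2A, PySem.List.pyRange_one 0 (size + 1),
    PySem.List.pyRange_one (size * size) (size * size + size + 1), List.map_map]
  have hn : (size * size + size + 1 - size * size).toNat = (size + 1 - 0).toNat := by omega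
  rw [hn]
  refine List.map_congr_left (fun b _ => ?_)
  simp only [Function.comp_apply]
  ring

lemma pv_scatterB_eq (size : Int) (hs : 0 < size) :
    pvScatterB size =
      (pvRowsAt size size.toNat, pvColsAt size size.toNat, pvSlopesAt size size.toNat) := by
  have hN : ((size.toNat : Int)) = size := by omega
  have hrows0 : (PySem.List.pyRange 0 size 1).map (fun _ => ([] : List Int)) =
      pvRowsAt size 0 := by
    rw [pvRowsAt, PySem.List.pyRange_one 0 size, List.map_map, sub_zero]
    rfl
  have hcols0 : (PySem.List.pyRange 0 size 1).map (fun _ => ([] : List Int)) =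
      pvColsAt size 0 := by
    rw [pvColsAt, PySem.List.pyRange_one 0 size, List.map_map, sub_zero]
    rfl
  have hslopes0 : (PySem.List.pyRange 0 (size - 1) 1).map (fun _ =>
      (PySem.List.pyRange 0 size 1).map (fun _ => ([] : List Int))) =
      pvSlopesAt size 0 := by
    rw [pvSlopesAt, PySem.List.pyRange_one 0 (size - 1), List.map_map]
    have h1 : (size - 1 - 0).toNat = size.toNat - 1 := by omega
    rw [h1]
    refine List.map_congr_left (fun xm1 _ => ?_)
    simp only [Function.comp_apply]
    rw [PySem.List.pyRange_one 0 size, List.map_map, sub_zero]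
    rfl
  have hinv := pv_scatter_inv size hs size.toNat (le_refl _)
  rw [hN] at hinv
  rw [← hslopes0, ← hcols0, ← hrows0] at hinv
  rw [pvScatterB]
  exact hinv

lemma pv_rows_final (size : Int) (hs : 0 < size) :
    (pvRowsAt size size.toNat).map (fun card => card ++ [size * size]) =
      pvClassCards size 0 1 1 0 0 := by
  rw [pvRowsAt, pvClassCards, PySem.List.pyRange_one 0 size, sub_zero, List.map_map,
    List.map_map]
  refine List.map_congr_left (fun t ht => ?_)
  rw [List.mem_range] at ht
  simp only [Function.comp_apply, add_zero]
  congr 1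
  rw [List.map_map]
  refine List.map_congr_left (fun b hb => ?_)
  rw [List.mem_range] at hb
  simp only [Function.comp_apply]
  rw [show (1 : Int) * (0 + (t : Int)) + (0 + (b : Int)) * 0 = (t : Int) by ring,
    show (0 : Int) * (0 + (t : Int)) + (0 + (b : Int)) * 1 = (b : Int) by ring,
    pv_mod_id (t : Int) size (by omega) (by omega),
    pv_mod_id (b : Int) size (by omega) (by omega)]
  ring

lemma pv_cols_final (size : Int) (hs : 0 < size) :
    (pvColsAt size size.toNat).map (fun card => card ++ [size * size + size]) =
      pvClassCards size 1 0 0 1 size := by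
  rw [pvColsAt, pvClassCards, PySem.List.pyRange_one 0 size, sub_zero, List.map_map,
    List.map_map]
  refine List.map_congr_left (fun t ht => ?_)
  rw [List.mem_range] at ht
  simp only [Function.comp_apply, if_pos ht]
  congr 1
  rw [pvColFull, List.map_map]
  refine List.map_congr_left (fun b hb => ?_)
  rw [List.mem_range] at hb
  simp only [Function.comp_apply]
  rw [show (0 : Int) * (0 + (t : Int)) + (0 + (b : Int)) * 1 = (b : Int) by ring,
    show (1 : Int) * (0 + (t : Int)) + (0 + (b : Int)) * 0 = (t : Int) by ring,
    pv_mod_id (t : Int) size (by omega) (by omega),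
    pv_mod_id (b : Int) size (by omega) (by omega)]
  ring

lemma pv_slopes_final (size : Int) (hs : 0 < size) :
    (PySem.List.pyRange 1 size 1).flatMap (fun x =>
      (PySem.List.pyGetD (pvSlopesAt size size.toNat) (x - 1) []).map
        (fun card => card ++ [size * size + x])) =
      (PySem.List.pyRange 1 size 1).flatMap (fun x => pvClassCards size x 1 1 0 x) := by
  refine List.flatMap_congr (fun x hx => ?_)
  rw [PySem.List.mem_pyRange_one] at hx
  have hlen : (pvSlopesAt size size.toNat).length = size.toNat - 1 := by
    simp [pvSlopesAt]
  have hget : PySem.List.pyGetD (pvSlopesAt size size.toNat) (x - 1) [] =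
      (List.range size.toNat).map (fun (t : Nat) =>
        (List.range size.toNat).map (fun (b : Nat) =>
          (b : Int) + size * PySem.Int.mod ((t : Int) + (b : Int) * ((((x - 1).toNat : Nat) : Int) + 1)) size)) := by
    rw [PySem.List.pyGetD_eq_getElem _ _ (by omega) (by rw [hlen]; omega)]
    simp only [pvSlopesAt, List.getElem_map, List.getElem_range]
  have hc : ((((x - 1).toNat : Nat)) : Int) + 1 = x := by omega
  rw [hget, hc, pvClassCards, PySem.List.pyRange_one 0 size, sub_zero, List.map_map,
    List.map_map]
  refine List.map_congr_left (fun t ht => ?_)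
  rw [List.mem_range] at ht
  simp only [Function.comp_apply]
  congr 1
  rw [List.map_map]
  refine List.map_congr_left (fun b hb => ?_)
  rw [List.mem_range] at hb
  simp only [Function.comp_apply]
  rw [show (0 : Int) * (0 + (t : Int)) + (0 + (b : Int)) * 1 = (b : Int) by ring,
    pv_mod_id (b : Int) size (by omega) (by omega),
    show (1 : Int) * (0 + (t : Int)) + (0 + (b : Int)) * x = (t : Int) + (b : Int) * x by ring]
  ring

-- ===== VERDICT (by name: the statement is the Claim_ definition above) =====
theorem fanoplane_spec : Claim_equal_fanoplane := by
  intro size _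
  unfold Spec_fanoplane fanoplane fanoplane_alt
  by_cases h : 0 < size
  · rw [pv_seg1 size h, pv_seg2 size h, pv_seg3 size h, pv_scatterB_eq size h,
      pv_rows_final size h, pv_cols_final size h]
    rw [pv_slopes_final size h, ← pv_list2_eq size]
  · have e1 : PySem.List.pyRange 0 size 1 = [] :=
      PySem.List.pyRange_one_eq_nil (by omega)
    have e2 : PySem.List.pyRange 1 size 1 = [] :=
      PySem.List.pyRange_one_eq_nil (by omega)
    have e3 : PySem.List.pyRange 0 (size - 1) 1 = [] :=
      PySem.List.pyRange_one_eq_nil (by omega)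
    simp [generateVectors, pvGridA, pvScatterB, e1, e2, e3, ← pv_list2_eq size,
      PySem.List.pyRange_one_eq_nil (le_refl (0 : Int))]
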